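-- pv_equiv track=rewrite | github.com/S8-StudyGroup/Navigate-Basic-Algorithms | NBA_doeon/2022_09/week_3rd/17681.py | solution
-- ===== SOURCE A (Python) =====
-- def solution(n, arr1, arr2):
--     rests_1 = []    # arr1의 이진수 변환 결과 (리스트 형태)
--     rests_2 = []    # arr2의 이진숫 변환 결과
--     map = [['#'] * n for _ in range(n)]  # 초기 지도 (모두 '#'으로 채워진 이차원리스트)
--     answer = []     # 최종 지도의 각 행을 문자열 형태로 저장할 출력 리스트
--
--     # 1. arr1 숫자들을 이진수로 변환함
--     for i in range(len(arr1)):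
--         rest = [0] * n  # 한 숫자마다의 나머지 저장 리스트 - [0, 0, 0, ... 0] 형태
--         num = arr1[i]   # arr의 한 숫자를 num으로 받음
--         j = n - 1       # 나머지 저장 리스트의 끝에서부터 나머지 값을 할당
--
--         while num != 0: # 몫이 0이 될 때까지
--             rest[j] = num % 2   # 2로 나눈 나머지를 저장 리스트에 할당
--             num = num // 2      # 몫을 업데이트
--             j -= 1              # rest 리스트 한 칸 앞으로 옮김
--
--         # rest 출력
--         # [0, 1, 0, 0, 1]
--         # [1, 0, 1, 0, 0]
--         # [1, 1, 1, 0, 0]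
--         # [1, 0, 0, 1, 0]
--         # [0, 1, 0, 1, 1]
--
--         rests_1.append(rest)    # 위 rest들을 이차원리스트로 저장
--
--     # 2. arr2의 숫자들을 이진수로 변환함
--     for i in range(len(arr2)):
--         rest = [0] * n
--         num = arr2[i]
--         j = n - 1
--
--         while num != 0:
--             rest[j] = num % 2
--             num = num // 2
--             j -= 1
--
--         rests_2.append(rest)
--
--     # 3. 두 나머지 2차원 리스트를 돌면서 둘 다 0인 경우만 map 원소를 공백으로 변환함
--     for r in range(n):
--         for c in range(n):
--             if rests_1[r][c] == 0 and rests_2[r][c] == 0: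
--                 map[r][c] = ' '
--
--     # 4. map의 각 행마다 문자열로 변환 후 리턴값에 저장
--     for row in range(n):
--         one_row = ''.join(map[row])
--         answer.append(one_row)
--
--     return answer
-- ===== SOURCE B (Python) =====
-- def solution(n, arr1, arr2):
--     def build(i):
--         if i == n:
--             return []
--         row = ''.join(' #'[int(ch)] for ch in format(arr1[i] | arr2[i], '0%db' % n))
--         return [row] + build(i + 1)
--     return build(0)
-- ===== Notes on version B (the rewrite author's own statement) =====
-- stated objective: alternative
-- what changed: B drops A's two hand-built binary digit grids, the element-wise OR pass and the mutable '#' map: a recursive row builder formats arr1[i] | arr2[i] directly as a zero-padded n-bit binary string and translates each digit via ' #'[int(ch)].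
-- outside the precondition, e.g. on solution(2, [4, 1], [1, 1]): A returns [' #', ' #'], B returns ['# #', ' #']; on solution(-1, [0], [0]): A returns [], B raises ValueError
import Mathlib
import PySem

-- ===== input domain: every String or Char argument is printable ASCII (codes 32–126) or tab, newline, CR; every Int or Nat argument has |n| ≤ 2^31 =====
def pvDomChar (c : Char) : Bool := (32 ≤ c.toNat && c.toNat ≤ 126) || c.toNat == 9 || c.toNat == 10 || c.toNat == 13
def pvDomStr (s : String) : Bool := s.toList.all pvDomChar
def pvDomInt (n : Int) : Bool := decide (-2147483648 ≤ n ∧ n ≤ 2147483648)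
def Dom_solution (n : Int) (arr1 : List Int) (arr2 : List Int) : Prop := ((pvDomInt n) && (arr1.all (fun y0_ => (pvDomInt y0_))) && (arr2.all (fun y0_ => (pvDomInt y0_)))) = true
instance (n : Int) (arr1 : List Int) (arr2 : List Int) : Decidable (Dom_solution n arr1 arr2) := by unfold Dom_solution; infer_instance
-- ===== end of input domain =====

-- B drops A's two binary digit grids, OR pass and mutable '#' map: a recursive row builder formats
-- arr1[i]|arr2[i] as a zero-padded n-bit binary string and maps digits to ' '/'#' (alternative; same cost).


-- ===== PORT A =====
-- Python list assignment rest[j] = v (negative index wraps; out-of-range raises — excluded by Pre_, here a no-op)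
def pySetList (xs : List Int) (j : Int) (v : Int) : List Int :=
  if 0 ≤ j ∧ j < xs.length then xs.set j.toNat v
  else if -(xs.length : Int) ≤ j ∧ j < 0 then xs.set ((xs.length : Int) + j).toNat v
  else xs

-- the 'while num != 0' loop; fuel makes it total (Python diverges for num < 0 — excluded by Pre_)
def convLoop (fuel : Nat) (num : Int) (rest : List Int) (j : Int) : List Int :=
  match fuel with
  | 0 => rest
  | f + 1 =>
    if num = 0 then rest
    else convLoop f (PySem.Int.floordiv num 2) (pySetList rest j (PySem.Int.mod num 2)) (j - 1)

-- one number -> list of n binary digits (A's per-number block: rest = [0]*n; j = n-1; while ...)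
def toBinRow (nn : Nat) (num : Int) : List Int :=
  convLoop (num.natAbs + 1) num (List.replicate nn (0 : Int)) ((nn : Int) - 1)

def solution (n : Int) (arr1 : List Int) (arr2 : List Int) : List String :=
  let nn := n.toNat
  -- steps 1 and 2: convert every number of arr1 / arr2, appending each rest
  let rests1 := (List.range arr1.length).foldl (fun acc i => acc ++ [toBinRow nn (arr1.getD i 0)]) []
  let rests2 := (List.range arr2.length).foldl (fun acc i => acc ++ [toBinRow nn (arr2.getD i 0)]) []
  -- step 3: the map starts all '#'; cell (r,c) is overwritten by ' ' iff both digits are 0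
  -- (each cell is written at most once from r,c alone, so the in-place double loop is ported as nested maps)
  let grid := (List.range nn).map (fun r => (List.range nn).map (fun c =>
      if (rests1.getD r []).getD c 0 = 0 ∧ (rests2.getD r []).getD c 0 = 0 then ' ' else '#'))
  -- step 4: join each row
  (List.range nn).foldl (fun ans row => ans ++ [String.ofList (grid.getD row [])]) []

-- ===== PORT B =====
-- format(v, '0{n}b'): binary digits of v left-padded with '0' to width n.toNat (exact for v >= 0 and
-- 0 <= n, which Pre_ guarantees; for n < 0 Python raises ValueError on the spec -- outside Pre_)
def fmtBin (w : Nat) (v : Int) : List Char :=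
  let s := PySem.Int.toBinChars v
  List.replicate (w - s.length) '0' ++ s

-- ' #'[int(ch)]; none = ValueError, out-of-range index = IndexError (Python raises; outside Pre_)
def trCh (ch : Char) : Char :=
  match PySem.Int.ofChars? [ch] with
  | some k => (PySem.List.pyGet? [' ', '#'] k).getD ' '
  | none => ' '

-- the recursive build(i); fuel makes it total (Python hits RecursionError for n < 0 -- outside Pre_)
def buildRows (n : Int) (arr1 : List Int) (arr2 : List Int) (fuel : Nat) (i : Int) : List String :=
  match fuel with
  | 0 => []
  | f + 1 =>
    if i = n then []
    else
      String.ofList ((fmtBin n.toNat (PySem.Int.bor (arr1.getD i.toNat 0) (arr2.getD i.toNat 0))).map trCh)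
        :: buildRows n arr1 arr2 f (i + 1)

def solution_alt (n : Int) (arr1 : List Int) (arr2 : List Int) : List String :=
  buildRows n arr1 arr2 (n.toNat + 1) 0

-- ===== PRECONDITION & SPEC =====
-- Pre_ restricts to the problem's stated domain: n is nonnegative, both arrays cover the n rows and
-- each of the n used entries is an n-bit nonnegative integer (tail entries, which A converts but never
-- reads, need only 2n bits so A's conversion terminates). Outside it A raises IndexError (a negative
-- entry, an entry of more than 2n bits, an array shorter than n, or a nonzero entry with n <= 0), and
-- on the two corners where A still returns neither value is specified: for a used entry of n..2n bits
-- A's rows are shaped by accidental negative-index wraparound while B's rows come out wider than n,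
-- and for n < 0 with all-zero arrays A returns [] where B's recursion cannot terminate.
def Pre_solution (n : Int) (arr1 : List Int) (arr2 : List Int) : Prop :=
  0 ≤ n ∧ n ≤ arr1.length ∧ n ≤ arr2.length ∧
  (∀ x ∈ arr1.take n.toNat, 0 ≤ x ∧ x < 2 ^ n.toNat) ∧
  (∀ x ∈ arr2.take n.toNat, 0 ≤ x ∧ x < 2 ^ n.toNat) ∧
  (∀ x ∈ arr1.drop n.toNat, 0 ≤ x ∧ x < 2 ^ (2 * n.toNat)) ∧
  (∀ x ∈ arr2.drop n.toNat, 0 ≤ x ∧ x < 2 ^ (2 * n.toNat))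
instance (n : Int) (arr1 : List Int) (arr2 : List Int) : Decidable (Pre_solution n arr1 arr2) := by
  unfold Pre_solution; infer_instance

def pvWitness_solution : Int × List Int × List Int := (5, [9, 20, 28, 18, 11], [30, 1, 21, 17, 28])

def Spec_solution (n : Int) (arr1 : List Int) (arr2 : List Int) (out : List String) : Prop := out = solution_alt n arr1 arr2
instance (n : Int) (arr1 : List Int) (arr2 : List Int) (out : List String) : Decidable (Spec_solution n arr1 arr2 out) := by unfold Spec_solution; infer_instance

-- ===== CLAIM (what is proved, stated in full; the proofs are below) =====
def Claim_equal_solution : Prop := ∀ (n : Int) (arr1 : List Int) (arr2 : List Int), Dom_solution n arr1 arr2 → Pre_solution n arr1 arr2 → Spec_solution n arr1 arr2 (solution n arr1 arr2)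

-- ===== LEMMAS AND PROOFS =====

def bitsN (k : Nat) (v : Nat) : List Char :=
  (List.range k).map (fun c => if v.testBit (k - 1 - c) then '1' else '0')
def bitsI (k : Nat) (v : Nat) : List Int :=
  (bitsN k v).map (fun c => if c = '1' then (1 : Int) else 0)
lemma bitsN_succ (k v : Nat) :
    bitsN (k + 1) v = bitsN k (v / 2) ++ [if v % 2 = 1 then '1' else '0'] := by
  unfold bitsN
  rw [List.range_succ, List.map_append]
  congr 1
  · apply List.map_congr_left
    intro c hc
    have hck : c < k := List.mem_range.mp hc
    have h1 : k + 1 - 1 - c = (k - 1 - c) + 1 := by omega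
    rw [h1, ← Nat.testBit_div_two]
  · simp [Nat.testBit_zero]
lemma bitsI_succ (k v : Nat) :
    bitsI (k + 1) v = bitsI k (v / 2) ++ [if v % 2 = 1 then (1 : Int) else 0] := by
  unfold bitsI
  rw [bitsN_succ, List.map_append]
  rcases Nat.mod_two_eq_zero_or_one v with h | h <;> simp [h]
lemma bitsN_zero (k : Nat) : bitsN k 0 = List.replicate k '0' := by
  unfold bitsN; simp [List.map_const']
lemma bitsI_zero (k : Nat) : bitsI k 0 = List.replicate k 0 := by
  unfold bitsI; rw [bitsN_zero]; simp
lemma convLoop_zero (fuel : Nat) (rest : List Int) (j : Int) : convLoop fuel 0 rest j = rest := by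
  cases fuel <;> simp [convLoop]
lemma set_replicate_last (j : Nat) (a b : Int) :
    (List.replicate (j + 1) a).set j b = List.replicate j a ++ [b] := by
  rw [List.replicate_succ', List.set_append]; simp
lemma floordiv_cast (v : Nat) : PySem.Int.floordiv (v : Int) 2 = ((v / 2 : Nat) : Int) := by
  exact_mod_cast PySem.Int.floordiv_natCast v 2
lemma mod_cast2 (v : Nat) : PySem.Int.mod (v : Int) 2 = ((v % 2 : Nat) : Int) := by
  exact_mod_cast PySem.Int.mod_natCast v 2
lemma loop_spec : ∀ (j v fuel : Nat) (tail : List Int), v < 2 ^ (j + 1) → v < fuel →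
    convLoop fuel (v : Int) (List.replicate (j + 1) 0 ++ tail) (j : Int) = bitsI (j + 1) v ++ tail := by
  intro j
  induction j with
  | zero =>
    intro v fuel tail hv hf
    by_cases h0 : v = 0
    · subst h0
      simp only [Nat.cast_zero]
      rw [convLoop_zero, bitsI_zero]
    · have hv1 : v = 1 := by omega
      subst hv1
      obtain ⟨f, rfl⟩ : ∃ f, fuel = f + 1 := ⟨fuel - 1, by omega⟩
      simp only [Nat.cast_one, Nat.cast_zero]
      rw [convLoop, if_neg (by norm_num)]
      rw [show PySem.Int.floordiv 1 2 = 0 by decide, show PySem.Int.mod 1 2 = 1 by decide]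
      rw [convLoop_zero]
      rw [show (List.replicate (0 + 1) (0:Int) ++ tail) = 0 :: tail by simp]
      rw [show pySetList (0 :: tail) 0 1 = 1 :: tail by simp [pySetList]]
      rw [show bitsI (0 + 1) 1 = [1] by decide]
      simp
  | succ k ih =>
    intro v fuel tail hv hf
    by_cases h0 : v = 0
    · subst h0
      simp only [Nat.cast_zero]
      rw [convLoop_zero, bitsI_zero]
    · obtain ⟨f, rfl⟩ : ∃ f, fuel = f + 1 := ⟨fuel - 1, by omega⟩
      rw [convLoop, if_neg (by exact_mod_cast h0), floordiv_cast, mod_cast2]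
      have hlen : (k + 1 : Nat) < (List.replicate (k + 1 + 1) (0:Int) ++ tail).length := by
        simp
        omega
      have hset : pySetList (List.replicate (k + 1 + 1) (0:Int) ++ tail) ((k + 1 : Nat) : Int)
          ((v % 2 : Nat) : Int) = List.replicate (k + 1) 0 ++ (((v % 2 : Nat) : Int) :: tail) := by
        unfold pySetList
        rw [if_pos (by constructor <;> [positivity; exact_mod_cast hlen])]
        rw [Int.toNat_natCast]
        rw [List.set_append_left _ _ (by simp), set_replicate_last]
        simp
      rw [hset]
      rw [show ((k + 1 : Nat) : Int) - 1 = (k : Int) by push_cast; ring]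
      have hdiv : v / 2 < 2 ^ (k + 1) := by
        rw [Nat.div_lt_iff_lt_mul (by norm_num)]
        calc v < 2 ^ (k + 1 + 1) := hv
        _ = 2 ^ (k + 1) * 2 := by ring
      have hfuel : v / 2 < f := by
        have := Nat.div_lt_self (Nat.pos_of_ne_zero h0) (by norm_num : (1:Nat) < 2)
        omega
      rw [ih (v / 2) f (((v % 2 : Nat) : Int) :: tail) hdiv hfuel]
      rw [bitsI_succ (k + 1) v]
      rcases Nat.mod_two_eq_zero_or_one v with h | h <;> simp [h]
lemma toBinRow_spec (j v : Nat) (h : v < 2 ^ (j + 1)) :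
    toBinRow (j + 1) (v : Int) = bitsI (j + 1) v := by
  unfold toBinRow
  rw [show ((v : Int).natAbs) = v by simp]
  rw [show ((j + 1 : Nat) : Int) - 1 = (j : Int) by push_cast; ring]
  have := loop_spec j v (v + 1) [] h (by omega)
  simpa using this
def binRep (v : Nat) : List Char :=
  if _h : v = 0 then [] else binRep (v / 2) ++ [if v % 2 = 1 then '1' else '0']
decreasing_by exact Nat.div_lt_self (Nat.pos_of_ne_zero _h) one_lt_two
lemma tdc_append : ∀ (fuel n : Nat) (ds : List Char),
    Nat.toDigitsCore 2 fuel n ds = Nat.toDigitsCore 2 fuel n [] ++ ds := by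
  intro fuel
  induction fuel with
  | zero => intro n ds; simp [Nat.toDigitsCore]
  | succ f ih =>
    intro n ds
    simp only [Nat.toDigitsCore]
    by_cases h : n / 2 = 0
    · simp [h]
    · rw [if_neg h, if_neg h, ih (n/2) (Nat.digitChar (n % 2) :: ds), ih (n/2) [Nat.digitChar (n % 2)]]
      simp
lemma tdc_spec : ∀ (v : Nat), v ≠ 0 → ∀ (fuel : Nat), v < fuel → Nat.toDigitsCore 2 fuel v [] = binRep v := by
  intro v
  induction v using Nat.strong_induction_on with
  | _ v IH =>
    intro hv0 fuel hf
    obtain ⟨f, rfl⟩ : ∃ f, fuel = f + 1 := ⟨fuel - 1, by omega⟩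
    simp only [Nat.toDigitsCore]
    rw [binRep]
    rw [dif_neg hv0]
    by_cases h : v / 2 = 0
    · have hv1 : v = 1 := by omega
      subst hv1
      simp [h, binRep, Nat.digitChar]
    · rw [if_neg h, tdc_append, IH (v / 2) (Nat.div_lt_self (Nat.pos_of_ne_zero hv0) one_lt_two) h f (by omega)]
      congr 1
      rcases Nat.mod_two_eq_zero_or_one v with hm | hm <;> simp [hm, Nat.digitChar]
lemma toDigits_two (v : Nat) : Nat.toDigits 2 v = if v = 0 then ['0'] else binRep v := by
  by_cases h : v = 0
  · subst h; simp [Nat.toDigits, Nat.toDigitsCore, Nat.digitChar]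
  · rw [if_neg h, Nat.toDigits, tdc_spec v h (v + 1) (by omega)]
lemma toBinChars_cast (v : Nat) : PySem.Int.toBinChars (v : Int) = Nat.toDigits 2 v := by
  simp [PySem.Int.toBinChars]
lemma fmtBin_succ (k v : Nat) (hk : 1 ≤ k) :
    fmtBin (k + 1) (v : Int) = fmtBin k ((v / 2 : Nat) : Int) ++ [if v % 2 = 1 then '1' else '0'] := by
  unfold fmtBin
  simp only [toBinChars_cast, toDigits_two]
  by_cases h2 : v / 2 = 0
  · have : v = 0 ∨ v = 1 := by omega
    have hb0 : binRep 0 = [] := by rw [binRep]; simp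
    have hb1 : binRep 1 = ['1'] := by rw [binRep]; norm_num [hb0]
    rcases this with rfl | rfl <;>
    · norm_num [hb0, hb1]
      rw [show k = (k - 1) + 1 by omega, List.replicate_succ']
      simp
  · have hv0 : v ≠ 0 := by omega
    rw [if_neg hv0, if_neg h2]
    conv_lhs => rw [binRep, dif_neg hv0]
    simp only [List.length_append, List.length_cons, List.length_nil, ← List.append_assoc]
    rw [show k + 1 - ((binRep (v / 2)).length + (0 + 1)) = k - (binRep (v / 2)).length by omega]
lemma fmtBin_spec : ∀ (k v : Nat), v < 2 ^ (k + 1) →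
    fmtBin (k + 1) (v : Int) = bitsN (k + 1) v := by
  intro k
  induction k with
  | zero =>
    intro v hv
    interval_cases v <;> decide
  | succ k ih =>
    intro v hv
    rw [fmtBin_succ (k + 1) v (by omega), bitsN_succ (k + 1) v]
    congr 1
    apply ih
    rw [Nat.div_lt_iff_lt_mul (by norm_num)]
    calc v < 2 ^ (k + 1 + 1) := hv
    _ = 2 ^ (k + 1) * 2 := by ring

lemma trCh_one : trCh '1' = '#' := by decide
lemma trCh_zero : trCh '0' = ' ' := by decide

def rowB (n : Int) (arr1 arr2 : List Int) (r : Nat) : String :=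
  String.ofList ((fmtBin n.toNat (PySem.Int.bor (arr1.getD r 0) (arr2.getD r 0))).map trCh)

lemma build_eq (n : Int) (arr1 arr2 : List Int) :
    ∀ (k : Nat) (i : Int) (fuel : Nat), 0 ≤ i → i + k = n → k < fuel →
    buildRows n arr1 arr2 fuel i = (List.range k).map (fun j => rowB n arr1 arr2 (i.toNat + j)) := by
  intro k
  induction k with
  | zero =>
    intro i fuel h0 hik hf
    obtain ⟨f, rfl⟩ : ∃ f, fuel = f + 1 := ⟨fuel - 1, by omega⟩
    rw [buildRows, if_pos (by omega)]
    simp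
  | succ k ih =>
    intro i fuel h0 hik hf
    obtain ⟨f, rfl⟩ : ∃ f, fuel = f + 1 := ⟨fuel - 1, by omega⟩
    rw [buildRows, if_neg (by omega)]
    rw [ih (i + 1) f (by omega) (by omega) (by omega)]
    show rowB n arr1 arr2 i.toNat :: _ = _
    rw [List.range_succ_eq_map, List.map_cons, List.map_map]
    refine congrArg₂ List.cons (by norm_num) ?_
    apply List.map_congr_left
    intro j hj
    simp only [Function.comp_apply]
    congr 1
    omega

theorem solution_eq (n : Int) (arr1 : List Int) (arr2 : List Int)
    (hpre : Pre_solution n arr1 arr2) : solution n arr1 arr2 = solution_alt n arr1 arr2 := by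
  obtain ⟨h0n, hn1, hn2, hb1, hb2, _, _⟩ := hpre
  unfold solution solution_alt
  simp only [PySem.List.foldl_append_singleton_eq_map, List.nil_append]
  rw [build_eq n arr1 arr2 n.toNat 0 (n.toNat + 1) le_rfl (by omega) (by omega)]
  apply List.map_congr_left
  intro r hrm
  have hr : r < n.toNat := List.mem_range.mp hrm
  have hl1 : n.toNat ≤ arr1.length := by omega
  have hl2 : n.toNat ≤ arr2.length := by omega
  have hr1 : r < arr1.length := by omega
  have hr2 : r < arr2.length := by omega
  simp only [Int.toNat_zero, Nat.zero_add]
  unfold rowB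
  -- the entry of the grid row list
  rw [PySem.List.getD_map_range _ _ _ _ hr,
      PySem.List.getD_map_range _ _ _ _ hr1, PySem.List.getD_map_range _ _ _ _ hr2,
      List.getD_eq_getElem arr1 0 hr1, List.getD_eq_getElem arr2 0 hr2]
  -- bounds on the two used entries
  have hmem1 : arr1[r] ∈ arr1.take n.toNat := by
    have hr' : r < (arr1.take n.toNat).length := by simp [List.length_take]; omega
    have h := List.getElem_mem hr'
    rwa [List.getElem_take] at h
  have hmem2 : arr2[r] ∈ arr2.take n.toNat := by
    have hr' : r < (arr2.take n.toNat).length := by simp [List.length_take]; omega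
    have h := List.getElem_mem hr'
    rwa [List.getElem_take] at h
  obtain ⟨ha0, haU⟩ := hb1 _ hmem1
  obtain ⟨hb0, hbU⟩ := hb2 _ hmem2
  set a : Nat := (arr1[r]).toNat with hadef
  set b : Nat := (arr2[r]).toNat with hbdef
  have haeq : arr1[r] = (a : Int) := (Int.toNat_of_nonneg ha0).symm
  have hbeq : arr2[r] = (b : Int) := (Int.toNat_of_nonneg hb0).symm
  have haN : a < 2 ^ n.toNat := by
    have : (a : Int) < ((2 ^ n.toNat : Nat) : Int) := by push_cast; rw [← haeq]; exact haU
    exact_mod_cast this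
  have hbN : b < 2 ^ n.toNat := by
    have : (b : Int) < ((2 ^ n.toNat : Nat) : Int) := by push_cast; rw [← hbeq]; exact hbU
    exact_mod_cast this
  obtain ⟨m, hm⟩ : ∃ m, n.toNat = m + 1 := ⟨n.toNat - 1, by omega⟩
  rw [haeq, hbeq, PySem.Int.bor_natCast, hm]
  rw [toBinRow_spec m a (hm ▸ haN), toBinRow_spec m b (hm ▸ hbN)]
  rw [fmtBin_spec m (a ||| b) (hm ▸ Nat.or_lt_two_pow haN hbN)]
  congr 1
  unfold bitsI bitsN
  simp only [List.map_map]
  apply List.map_congr_left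
  intro c hcm
  simp only [Function.comp_apply]
  rw [PySem.List.getD_map_range _ _ _ _ (List.mem_range.mp hcm),
      PySem.List.getD_map_range _ _ _ _ (List.mem_range.mp hcm)]
  simp only [Nat.add_sub_cancel]
  by_cases h1 : a.testBit (m - c) <;> by_cases h2 : b.testBit (m - c) <;>
    simp [h1, h2, trCh_one, trCh_zero]

-- ===== VERDICT (by name: the statement is the Claim_ definition above) =====
theorem solution_spec : Claim_equal_solution := by
  intro n arr1 arr2 _ hpre
  unfold Spec_solution
  exact solution_eq n arr1 arr2 hpre
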